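-- pv_equiv track=rewrite | github.com/home-assistant-libs/python-matter-server | scripts/generate_devices.py | gen_cls_name
-- ===== SOURCE A (Python) =====
-- def gen_cls_name(name: str):
--     # Convert uppercase words to titlecase
--     name = "".join(
--         # Don't mess up wifi name
--         part if part == "WiFi" else part[0].upper() + part[1:].lower()
--         for part in name.split(" ")
--     )
--
--     new_name = []
--
--     next_upper = False
--     for char in name:
--         if char in ("-", "/"):
--             next_upper = True
--             continue
--         elif next_upper:
--             char = char.upper()
--             next_upper = False
--
--         new_name.append(char)
--
--     return "".join(new_name)
-- ===== SOURCE B (Python) =====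
-- def gen_cls_name(name: str):
--     # Phase one: titlecase space-split words (keep "WiFi" as-is).
--     titled = "".join(
--         word if word == "WiFi" else word[:1].upper() + word[1:].lower()
--         for word in name.split(" ")
--     )
--     # Phase two: drop '-'/'/' separators, capitalizing the char that follows one.
--     segments = titled.replace("/", "-").split("-")
--     return segments[0] + "".join(s[:1].upper() + s[1:] for s in segments[1:])
-- ===== Notes on version B (the rewrite author's own statement) =====
-- stated objective: idiomatic
-- what changed: Phase two's char-by-char next_upper state machine is replaced by splitting the titled string on '-'/'/' and rejoining with each later segment's first character uppercased (C-level str.replace/split/slice instead of a per-character Python loop).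
import Mathlib
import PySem

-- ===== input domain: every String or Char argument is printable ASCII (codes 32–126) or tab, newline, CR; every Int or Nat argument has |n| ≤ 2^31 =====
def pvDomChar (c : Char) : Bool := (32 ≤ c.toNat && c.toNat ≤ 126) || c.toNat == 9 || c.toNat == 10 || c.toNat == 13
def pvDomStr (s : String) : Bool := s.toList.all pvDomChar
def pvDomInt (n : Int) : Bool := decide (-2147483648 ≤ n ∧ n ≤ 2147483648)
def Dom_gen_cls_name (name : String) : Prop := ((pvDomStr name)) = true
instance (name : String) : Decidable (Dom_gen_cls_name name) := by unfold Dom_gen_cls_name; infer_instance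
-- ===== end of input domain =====

-- B replaces A's char-by-char next_upper state machine (phase two) by a split on '-'/'/'
-- and a rejoin that uppercases each later segment's first character (idiomatic, same cost).


-- ===== PORT A =====
-- part if part == "WiFi" else part[0].upper() + part[1:].lower()
-- (the [] branch of pyGet? is Python's IndexError; Pre_ excludes it)
def pvTitleA (part : List Char) : List Char :=
  if part = "WiFi".toList then part
  else
    match PySem.List.pyGet? part 0 with
    | none => []   -- IndexError in Python; unreachable under Pre_
    | some c => PySem.Chars.upperChar c :: PySem.Chars.lower (PySem.List.slice part (some 1) none)

-- the for-loop over chars with the next_upper flag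
def pvLoopA : List Char → Bool → List Char
  | [], _ => []
  | c :: cs, nextUpper =>
    if c = '-' ∨ c = '/' then pvLoopA cs true
    else (if nextUpper then PySem.Chars.upperChar c else c) :: pvLoopA cs false

def gen_cls_name (name : String) : String :=
  let titled := PySem.Chars.join [] ((PySem.Chars.splitOn name.toList [' ']).map pvTitleA)
  String.mk (pvLoopA titled false)

-- ===== PORT B =====
-- word if word == "WiFi" else word[:1].upper() + word[1:].lower()
def pvTitleB (word : List Char) : List Char :=
  if word = "WiFi".toList then word
  else PySem.Chars.upper (PySem.List.slice word none (some 1)) ++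
       PySem.Chars.lower (PySem.List.slice word (some 1) none)

-- s[:1].upper() + s[1:]
def pvCapB (s : List Char) : List Char :=
  PySem.Chars.upper (PySem.List.slice s none (some 1)) ++ PySem.List.slice s (some 1) none

def gen_cls_name_alt (name : String) : String :=
  let titled := PySem.Chars.join [] ((PySem.Chars.splitOn name.toList [' ']).map pvTitleB)
  let segments := PySem.Chars.splitOn (PySem.Chars.replace titled ['/'] ['-']) ['-']
  -- segments[0]: str.split never returns an empty list, so headD's default is unreachable
  String.mk (segments.headD [] ++
    PySem.Chars.join [] ((PySem.List.slice segments (some 1) none).map pvCapB))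

-- ===== PRECONDITION & SPEC =====
-- Pre_ excludes exactly the inputs on which A raises IndexError: names whose split on " "
-- contains an empty word (empty name, leading/trailing or consecutive spaces).
def Pre_gen_cls_name (name : String) : Prop :=
  [] ∉ PySem.Chars.splitOn name.toList [' ']
instance (name : String) : Decidable (Pre_gen_cls_name name) := by
  unfold Pre_gen_cls_name; infer_instance
def pvWitness_gen_cls_name : String := "matter device-type/node"

def Spec_gen_cls_name (name : String) (out : String) : Prop := out = gen_cls_name_alt name
instance (name : String) (out : String) : Decidable (Spec_gen_cls_name name out) := by
  unfold Spec_gen_cls_name; infer_instance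

-- ===== CLAIM (what is proved, stated in full; the proofs are below) =====
def Claim_equal_gen_cls_name : Prop := ∀ (name : String), Dom_gen_cls_name name → Pre_gen_cls_name name → Spec_gen_cls_name name (gen_cls_name name)

-- ===== LEMMAS AND PROOFS =====

-- a simple recursion computing s.split(d) for a single-char separator
def pvSplit1 (d : Char) : List Char → List (List Char)
  | [] => [[]]
  | c :: cs => if c = d then [] :: pvSplit1 d cs
               else (pvSplit1 d cs).modifyHead (c :: ·)

theorem pvSplit1_ne_nil (d : Char) (cs : List Char) : pvSplit1 d cs ≠ [] := by
  induction cs with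
  | nil => simp [pvSplit1]
  | cons c cs ih =>
    simp only [pvSplit1]
    split
    · simp
    · cases h : pvSplit1 d cs with
      | nil => exact absurd h ih
      | cons s S => simp [List.modifyHead]

theorem pvSplitOn_go_eq (d : Char) (l : List Char) :
    ∀ (fuel : Nat) (cur : List Char) (acc : List (List Char)), l.length ≤ fuel →
      PySem.Chars.splitOn.go [d] fuel l cur acc =
        acc.reverse ++ (pvSplit1 d l).modifyHead (cur.reverse ++ ·) := by
  induction l with
  | nil =>
    intro fuel cur acc _
    cases fuel <;> simp [PySem.Chars.splitOn.go, pvSplit1]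
  | cons c rest ih =>
    intro fuel cur acc hle
    cases fuel with
    | zero => simp at hle
    | succ f =>
      simp only [List.length_cons, Nat.add_le_add_iff_right] at hle
      by_cases hc : c = d
      · subst hc
        rw [show PySem.Chars.splitOn.go [c] (f+1) (c :: rest) cur acc =
              PySem.Chars.splitOn.go [c] f rest [] (cur.reverse :: acc) by
            simp [PySem.Chars.splitOn.go, List.isPrefixOf]]
        rw [ih f [] (cur.reverse :: acc) hle]
        obtain ⟨s, S, hS⟩ := List.exists_cons_of_ne_nil (pvSplit1_ne_nil c rest)
        simp [pvSplit1, hS, List.modifyHead]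
      · have hdc : ¬ d = c := fun h => hc h.symm
        rw [show PySem.Chars.splitOn.go [d] (f+1) (c :: rest) cur acc =
              PySem.Chars.splitOn.go [d] f rest (c :: cur) acc by
            simp [PySem.Chars.splitOn.go, List.isPrefixOf, hdc]]
        rw [ih f (c :: cur) acc hle]
        simp only [pvSplit1, if_neg hc]
        obtain ⟨s, S, hS⟩ := List.exists_cons_of_ne_nil (pvSplit1_ne_nil d rest)
        simp [hS, List.modifyHead]

theorem pvSplitOn_eq (d : Char) (l : List Char) :
    PySem.Chars.splitOn l [d] = pvSplit1 d l := by
  rw [PySem.Chars.splitOn, pvSplitOn_go_eq d l (l.length + 1) [] [] (by omega)]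
  obtain ⟨s, S, hS⟩ := List.exists_cons_of_ne_nil (pvSplit1_ne_nil d l)
  simp [hS, List.modifyHead]

-- replace with single-char old/new is a map
theorem pvReplace_go_eq (o n : Char) (l : List Char) :
    ∀ (fuel : Nat) (acc : List Char), l.length ≤ fuel →
      PySem.Chars.replace.go [o] [n] fuel l acc =
        acc.reverse ++ l.map (fun c => if c = o then n else c) := by
  induction l with
  | nil => intro fuel acc _; cases fuel <;> simp [PySem.Chars.replace.go]
  | cons c rest ih =>
    intro fuel acc hle
    cases fuel with
    | zero => simp at hle
    | succ f =>
      simp only [List.length_cons, Nat.add_le_add_iff_right] at hle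
      by_cases hc : c = o
      · subst hc
        rw [show PySem.Chars.replace.go [c] [n] (f+1) (c :: rest) acc =
              PySem.Chars.replace.go [c] [n] f rest ([n].reverse ++ acc) by
            simp [PySem.Chars.replace.go, List.isPrefixOf]]
        rw [ih f _ hle]; simp
      · have hoc : ¬ o = c := fun h => hc h.symm
        rw [show PySem.Chars.replace.go [o] [n] (f+1) (c :: rest) acc =
              PySem.Chars.replace.go [o] [n] f rest (c :: acc) by
            simp [PySem.Chars.replace.go, List.isPrefixOf, hoc]]
        rw [ih f _ hle]; simp [hc]

theorem pvReplace_eq (o n : Char) (l : List Char) :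
    PySem.Chars.replace l [o] [n] = l.map (fun c => if c = o then n else c) := by
  rw [PySem.Chars.replace, if_neg (by simp)]
  exact pvReplace_go_eq o n l l.length [] le_rfl

-- splitting the '/'→'-' image on '-' = splitting the original on both separators
def pvSplit2 : List Char → List (List Char)
  | [] => [[]]
  | c :: cs => if c = '-' ∨ c = '/' then [] :: pvSplit2 cs
               else (pvSplit2 cs).modifyHead (c :: ·)

theorem pvSplit1_map_eq_split2 (l : List Char) :
    pvSplit1 '-' (l.map (fun c => if c = '/' then '-' else c)) = pvSplit2 l := by
  induction l with
  | nil => rfl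
  | cons c cs ih =>
    by_cases h : c = '/'
    · subst h; simp [pvSplit1, pvSplit2, ih]
    · by_cases h2 : c = '-'
      · subst h2; simp [pvSplit1, pvSplit2, ih]
      · simp [pvSplit1, pvSplit2, h, h2, ih]

theorem pvSplit2_ne_nil (cs : List Char) : pvSplit2 cs ≠ [] := by
  induction cs with
  | nil => simp [pvSplit2]
  | cons c cs ih =>
    simp only [pvSplit2]
    split
    · simp
    · cases h : pvSplit2 cs with
      | nil => exact absurd h ih
      | cons s S => simp [List.modifyHead]

theorem pvJoin_nil_sep (L : List (List Char)) : PySem.Chars.join [] L = L.flatten := by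
  induction L with
  | nil => simp [PySem.Chars.join, List.intercalate]
  | cons a L ih => cases L <;> simp_all [PySem.Chars.join, List.intercalate, List.intersperse]

-- pvCapB on a list: first char (if any) uppercased
theorem pvCapB_nil : pvCapB [] = [] := by decide

theorem pvCapB_cons (c : Char) (s : List Char) :
    pvCapB (c :: s) = PySem.Chars.upperChar c :: s := by
  simp [pvCapB, PySem.List.slice_to (c :: s) (b := 1) (by omega),
        PySem.List.slice_from_one, PySem.Chars.upper]

-- the state machine equals the split-and-capitalize rejoin (both flag values at once)
theorem pvLoopA_eq_split2 (cs : List Char) :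
    pvLoopA cs false = (pvSplit2 cs).headD [] ++ ((pvSplit2 cs).tail.map pvCapB).flatten ∧
    pvLoopA cs true = ((pvSplit2 cs).map pvCapB).flatten := by
  induction cs with
  | nil => simp [pvLoopA, pvSplit2, pvCapB_nil]
  | cons c cs ih =>
    obtain ⟨ihF, ihT⟩ := ih
    by_cases h : c = '-' ∨ c = '/'
    · simp only [pvLoopA, pvSplit2, if_pos h]
      exact ⟨by simpa [pvCapB_nil] using ihT, by simp [pvCapB_nil, ihT]⟩
    · obtain ⟨s, S, hS⟩ := List.exists_cons_of_ne_nil (pvSplit2_ne_nil cs)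
      simp only [pvLoopA, pvSplit2, if_neg h, hS, List.modifyHead]
      constructor
      · simp [ihF, hS]
      · simp [ihF, hS, pvCapB_cons]

-- under Pre_, the two titlecasings agree on every (nonempty) word of the split
theorem pvTitle_eq_of_ne_nil (part : List Char) (h : part ≠ []) :
    pvTitleA part = pvTitleB part := by
  obtain ⟨c, rest, hc⟩ := List.exists_cons_of_ne_nil h
  subst hc
  simp only [pvTitleA, pvTitleB]
  split
  · rfl
  · simp [PySem.List.pyGet?, PySem.List.pyIdx?,
          PySem.List.slice_to (c :: rest) (b := 1) (by omega),
          PySem.List.slice_from_one, PySem.Chars.upper, PySem.Chars.lower]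

-- ===== VERDICT (by name: the statement is the Claim_ definition above) =====
theorem gen_cls_name_spec : Claim_equal_gen_cls_name := by
  intro name _ hpre
  unfold Spec_gen_cls_name
  have htitled : (PySem.Chars.splitOn name.toList [' ']).map pvTitleA =
      (PySem.Chars.splitOn name.toList [' ']).map pvTitleB := by
    apply List.map_congr_left
    intro part hpart
    exact pvTitle_eq_of_ne_nil part (fun hnil => hpre (hnil ▸ hpart))
  simp only [gen_cls_name, gen_cls_name_alt, htitled]
  congr 1
  rw [pvReplace_eq, pvSplitOn_eq, pvSplitOn_eq, pvSplit1_map_eq_split2,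
      (pvLoopA_eq_split2 _).1, PySem.List.slice_from_one, pvJoin_nil_sep, pvJoin_nil_sep]
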